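-- pv_equiv track=rewrite | github.com/tmp-coder/CC-DGDGepsilon-PSO | code/processGroup.py | solve
-- ===== SOURCE A (Python) =====
-- from queue import PriorityQueue
--
-- def solve(pri,sepSz=64):
--     Q = PriorityQueue()
--     for i in range(len(pri)):
--         Q.put((int(pri[i]),[(i+1)]))
--     while Q.qsize()>1:
--         item1 = Q.get()
--         item2 = Q.get()
--         if item1[0]+item2[0]>sepSz:
--             Q.put(item2)
--             Q.put(item1)
--             break
--         Q.put((item1[0]+item2[0],item1[1]+item2[1]))
--     ret =[]
--     while not Q.empty():
--         ret.append(Q.get()[1])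
--     #assert min(ret)>0
--     return ret
-- ===== SOURCE B (Python) =====
-- def solve(pri, sepSz=64):
--     # sorted-list variant: keep the work list sorted by insertion, so the two
--     # smallest items are always the first two and the final drain is a plain map
--     items = []
--     for i, p in enumerate(pri):
--         items = _ins(items, (int(p), [i + 1]))
--     while len(items) > 1:
--         x, y = items[0], items[1]
--         if x[0] + y[0] > sepSz:
--             break
--         items = _ins(items[2:], (x[0] + y[0], x[1] + y[1]))
--     return [it[1] for it in items]
--
-- def _ins(items, new):
--     k = 0
--     while k < len(items) and items[k] < new:
--         k += 1
--     return items[:k] + [new] + items[k:]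
-- ===== Notes on version B (the rewrite author's own statement) =====
-- stated objective: alternative
-- what changed: Replaces the heap-backed PriorityQueue (put/get/qsize and a separate drain loop) with a plain list kept sorted by explicit linear-scan insertion: the two smallest items are always the first two elements, and the final result is a direct map over the already-sorted list instead of repeated extract-min.
import Mathlib
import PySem

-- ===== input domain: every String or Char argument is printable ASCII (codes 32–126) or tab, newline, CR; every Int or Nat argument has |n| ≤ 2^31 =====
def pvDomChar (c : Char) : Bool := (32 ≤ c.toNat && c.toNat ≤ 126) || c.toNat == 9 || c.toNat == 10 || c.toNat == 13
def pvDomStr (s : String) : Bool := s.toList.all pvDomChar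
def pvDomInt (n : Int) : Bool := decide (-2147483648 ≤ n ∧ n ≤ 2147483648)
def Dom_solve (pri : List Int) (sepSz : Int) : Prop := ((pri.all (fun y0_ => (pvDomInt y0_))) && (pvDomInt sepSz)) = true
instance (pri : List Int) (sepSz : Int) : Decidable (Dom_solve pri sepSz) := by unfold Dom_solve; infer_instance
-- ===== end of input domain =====

-- B replaces A's heap-backed PriorityQueue by a list kept sorted via explicit
-- linear-scan insertion (objective: alternative structure, same exact results).

-- Python's '<' on the (int, list-of-int) tuples held by the queue:
-- lexicographic on the pair, with Python list comparison = Lean's '<' on List Int.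
def itemLt (a b : Int × List Int) : Bool :=
  decide (a.1 < b.1) || (a.1 == b.1 && decide (a.2 < b.2))

-- ===== PORT A =====
-- The PriorityQueue is modelled as the plain list of its contents (puts append);
-- Q.get() returns the smallest element under the tuple order (exact: the queue's
-- elements are totally ordered, so the heap's get is determined) and removes its
-- first occurrence.
def pqMin (x : Int × List Int) (t : List (Int × List Int)) : Int × List Int :=
  t.foldl (fun m y => if itemLt y m then y else m) x

theorem pqMin_mem (x : Int × List Int) (t : List (Int × List Int)) :
    pqMin x t ∈ x :: t := by
  induction t generalizing x with
  | nil => simp [pqMin]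
  | cons y ys ih =>
    have h := List.mem_cons.mp (ih (if itemLt y x then y else x))
    have step : pqMin x (y :: ys) = pqMin (if itemLt y x then y else x) ys := by
      simp [pqMin]
    rw [step]
    by_cases hb : itemLt y x = true
    · rw [if_pos hb] at h ⊢
      rcases h with h | h
      · rw [h]; simp
      · simp [h]
    · rw [if_neg (by simp [hb])] at h ⊢
      rcases h with h | h
      · rw [h]; simp
      · simp [h]

-- the while Q.qsize()>1 merge loop of A; each pass removes one queue element,
-- so an initial fuel of the queue's length is a pure totality guard (never hit)
def loopA (fuel : Nat) (q : List (Int × List Int)) (sepSz : Int) :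
    List (Int × List Int) :=
  match fuel, q with
  | fuel + 1, x :: y :: t =>
    let m1 := pqMin x (y :: t)
    match (x :: y :: t).erase m1 with
    | [] => []          -- unreachable: erasing one element of a 2+ element list
    | z :: u =>
      let m2 := pqMin z u
      let q2 := (z :: u).erase m2
      if m1.1 + m2.1 > sepSz then q2 ++ [m2, m1]
      else loopA fuel (q2 ++ [(m1.1 + m2.1, m1.2 ++ m2.2)]) sepSz
  | _, _ => q

-- the final drain loop of A: pop minima until the queue is empty, keep payloads
def drainA (q : List (Int × List Int)) : List (List Int) :=
  match q with
  | [] => []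
  | x :: t =>
    let m := pqMin x t
    m.2 :: drainA ((x :: t).erase m)
termination_by q.length
decreasing_by
  simp [List.length_erase_of_mem (pqMin_mem x t)]

def solve (pri : List Int) (sepSz : Int) : List (List Int) :=
  drainA (loopA (pri.mapIdx fun i p => (p, [(i : Int) + 1])).length
    (pri.mapIdx fun i p => (p, [(i : Int) + 1])) sepSz)

-- ===== PORT B =====
-- _ins: scan past the elements smaller than the new item, splice it in
def ins (s : List (Int × List Int)) (v : Int × List Int) : List (Int × List Int) :=
  match s with
  | [] => [v]
  | y :: ys => if itemLt y v then y :: ins ys v else v :: y :: ys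

-- the while len(items)>1 loop of B: the two smallest are the first two
def loopB (s : List (Int × List Int)) (sepSz : Int) : List (Int × List Int) :=
  match s with
  | a :: b :: rest =>
    if a.1 + b.1 > sepSz then a :: b :: rest
    else loopB (ins rest (a.1 + b.1, a.2 ++ b.2)) sepSz
  | _ => s
termination_by s.length
decreasing_by
  have : ∀ (l : List (Int × List Int)) v, (ins l v).length = l.length + 1 := by
    intro l v
    induction l with
    | nil => simp [ins]
    | cons y ys ih => by_cases hb : itemLt y v = true <;> simp [ins, hb, ih]
  simp [this]

def solve_alt (pri : List Int) (sepSz : Int) : List (List Int) :=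
  (loopB ((pri.mapIdx fun i p => (p, [(i : Int) + 1])).foldl ins []) sepSz).map
    (fun it => it.2)

-- ===== PRECONDITION & SPEC =====
def Spec_solve (pri : List Int) (sepSz : Int) (out : List (List Int)) : Prop := out = solve_alt pri sepSz
instance (pri : List Int) (sepSz : Int) (out : List (List Int)) : Decidable (Spec_solve pri sepSz out) := by unfold Spec_solve; infer_instance

-- ===== CLAIM (what is proved, stated in full; the proofs are below) =====
def Claim_equal_solve : Prop := ∀ (pri : List Int) (sepSz : Int), Dom_solve pri sepSz → Spec_solve pri sepSz (solve pri sepSz)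

-- ===== LEMMAS AND PROOFS =====

theorem itemLt_iff (a b : Int × List Int) :
    itemLt a b = true ↔ a.1 < b.1 ∨ (a.1 = b.1 ∧ a.2 < b.2) := by
  simp [itemLt]

theorem itemLt_irrefl (a : Int × List Int) : itemLt a a = false := by
  simp [itemLt]

theorem itemLt_asymm {a b : Int × List Int} (h : itemLt a b = true) :
    itemLt b a = false := by
  rw [itemLt_iff] at h
  rw [Bool.eq_false_iff, Ne, itemLt_iff]
  rcases h with h | ⟨h1, h2⟩
  · rintro (h' | ⟨h1', _⟩) <;> [exact absurd h' (lt_asymm h); exact absurd h1'.symm (ne_of_lt h)]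
  · rintro (h' | ⟨_, h2'⟩) <;> [exact absurd h' (by simp [h1]); exact absurd h2' (lt_asymm h2)]

theorem itemLt_conn {a b : Int × List Int} (hab : itemLt a b = false)
    (hba : itemLt b a = false) : a = b := by
  rw [Bool.eq_false_iff, Ne, itemLt_iff] at hab hba
  push_neg at hab hba
  have h1 : a.1 = b.1 := le_antisymm hba.1 hab.1
  have h2 : a.2 = b.2 := le_antisymm (hba.2 h1.symm) (hab.2 h1)
  exact Prod.ext h1 h2

theorem itemLt_neg_trans {a b c : Int × List Int} (hab : itemLt a b = false)
    (hbc : itemLt b c = false) : itemLt a c = false := by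
  rw [Bool.eq_false_iff, Ne, itemLt_iff] at hab hbc ⊢
  push_neg at hab hbc ⊢
  refine ⟨le_trans hbc.1 hab.1, ?_⟩
  intro h1
  have e1 : a.1 = b.1 := by
    have := hbc.1; have := hab.1; omega
  have e2 : b.1 = c.1 := by
    have := hbc.1; have := hab.1; omega
  exact le_trans (hbc.2 e2) (hab.2 e1)

-- equation lemmas for the loop recursions
theorem loopA_low (fuel : Nat) (q : List (Int × List Int)) (sepSz : Int)
    (h : q.length ≤ 1) : loopA fuel q sepSz = q := by
  match fuel, q with
  | 0, q => rw [loopA.eq_def]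
  | fuel + 1, [] => rw [loopA.eq_def]
  | fuel + 1, [x] => rw [loopA.eq_def]
  | fuel + 1, x :: y :: t => simp at h

theorem loopA_step (fuel : Nat) (x y z : Int × List Int)
    (t u : List (Int × List Int)) (sepSz : Int)
    (h1 : (x :: y :: t).erase (pqMin x (y :: t)) = z :: u) :
    loopA (fuel + 1) (x :: y :: t) sepSz =
      (if (pqMin x (y :: t)).1 + (pqMin z u).1 > sepSz
       then (z :: u).erase (pqMin z u) ++ [pqMin z u, pqMin x (y :: t)]
       else loopA fuel ((z :: u).erase (pqMin z u) ++
              [((pqMin x (y :: t)).1 + (pqMin z u).1,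
                (pqMin x (y :: t)).2 ++ (pqMin z u).2)]) sepSz) := by
  rw [loopA.eq_def]
  simp only [h1]

theorem loopB_nil (sepSz : Int) : loopB [] sepSz = [] := by
  rw [loopB.eq_def]

theorem loopB_single (a : Int × List Int) (sepSz : Int) : loopB [a] sepSz = [a] := by
  rw [loopB.eq_def]

theorem loopB_cons2 (a b : Int × List Int) (rest : List (Int × List Int)) (sepSz : Int) :
    loopB (a :: b :: rest) sepSz =
      if a.1 + b.1 > sepSz then a :: b :: rest
      else loopB (ins rest (a.1 + b.1, a.2 ++ b.2)) sepSz := by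
  rw [loopB.eq_def]

theorem drainA_nil : drainA [] = [] := by
  rw [drainA.eq_def]

theorem drainA_cons (x : Int × List Int) (t : List (Int × List Int)) :
    drainA (x :: t) = (pqMin x t).2 :: drainA ((x :: t).erase (pqMin x t)) := by
  rw [drainA.eq_def]

-- wLe a b: "a ≤ b" in the Python tuple order
def wLe (a b : Int × List Int) : Prop := itemLt b a = false

theorem pqMin_isMin (x : Int × List Int) (t : List (Int × List Int)) :
    ∀ y ∈ x :: t, itemLt y (pqMin x t) = false := by
  induction t generalizing x with
  | nil =>
    intro y hy
    simp at hy; subst hy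
    simpa [pqMin] using itemLt_irrefl y
  | cons z zs ih =>
    intro y hy
    have step : pqMin x (z :: zs) = pqMin (if itemLt z x then z else x) zs := by
      simp [pqMin]
    rw [step]
    by_cases hb : itemLt z x = true
    · simp only [hb, if_true]
      have hz : itemLt z (pqMin z zs) = false := ih z z (by simp)
      have hx : itemLt x (pqMin z zs) = false := itemLt_neg_trans (itemLt_asymm hb) hz
      rcases List.mem_cons.mp hy with rfl | hy
      · exact hx
      rcases List.mem_cons.mp hy with rfl | hy
      · exact hz
      · exact ih z y (by simp [hy])
    · have hb' : itemLt z x = false := by simpa using hb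
      simp only [hb, if_false]
      have hx : itemLt x (pqMin x zs) = false := ih x x (by simp)
      have hz : itemLt z (pqMin x zs) = false := itemLt_neg_trans hb' hx
      rcases List.mem_cons.mp hy with rfl | hy
      · exact hx
      rcases List.mem_cons.mp hy with rfl | hy
      · exact hz
      · exact ih x y (by simp [hy])

-- extracting the minimum from q mirrors taking the head of the sorted list
theorem extract_head {s' : List (Int × List Int)} {a : Int × List Int}
    {x : Int × List Int} {t : List (Int × List Int)}
    (hperm : (x :: t).Perm (a :: s')) (hsort : (a :: s').Pairwise wLe) :
    pqMin x t = a ∧ ((x :: t).erase (pqMin x t)).Perm s' := by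
  have hmem : pqMin x t ∈ x :: t := pqMin_mem x t
  have hmem' : pqMin x t ∈ a :: s' := hperm.mem_iff.mp hmem
  have ha_mem : a ∈ x :: t := hperm.mem_iff.mpr (by simp)
  have hle_a : itemLt a (pqMin x t) = false := pqMin_isMin x t a ha_mem
  have heq : pqMin x t = a := by
    rcases List.mem_cons.mp hmem' with h | hm
    · exact h
    · exact (itemLt_conn hle_a (List.rel_of_pairwise_cons hsort hm)).symm
  refine ⟨heq, ?_⟩
  rw [heq]
  have := hperm.erase a
  simpa using this

-- draining the queue lists the payloads of its sorted mirror in order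
theorem drainA_eq {s : List (Int × List Int)} :
    ∀ {q : List (Int × List Int)}, q.Perm s → s.Pairwise wLe →
      drainA q = s.map (fun it => it.2) := by
  induction s with
  | nil =>
    intro q hperm _
    have := hperm.eq_nil
    subst this; simp [drainA_nil]
  | cons a s' ih =>
    intro q hperm hsort
    match q with
    | [] => exact absurd hperm.length_eq (by simp)
    | x :: t =>
      obtain ⟨hmin, hperm'⟩ := extract_head hperm hsort
      rw [drainA_cons, hmin]
      rw [hmin] at hperm'
      simp only [List.map_cons, List.cons.injEq]
      exact ⟨trivial, ih hperm' (List.Pairwise.of_cons hsort)⟩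

theorem mem_ins {s : List (Int × List Int)} {v y : Int × List Int} :
    y ∈ ins s v ↔ y = v ∨ y ∈ s := by
  induction s with
  | nil => simp [ins]
  | cons z zs ih =>
    by_cases hb : itemLt z v = true
    · rw [ins, if_pos hb]
      simp only [List.mem_cons, ih]
      tauto
    · rw [ins, if_neg (by simp [hb])]
      simp only [List.mem_cons]

theorem ins_perm (s : List (Int × List Int)) (v : Int × List Int) :
    (ins s v).Perm (v :: s) := by
  induction s with
  | nil => simp [ins]
  | cons z zs ih =>
    by_cases hb : itemLt z v = true
    · rw [ins, if_pos hb]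
      exact (ih.cons z).trans (List.Perm.swap v z zs)
    · rw [ins, if_neg (by simp [hb])]

theorem ins_pairwise {s : List (Int × List Int)} {v : Int × List Int}
    (hs : s.Pairwise wLe) : (ins s v).Pairwise wLe := by
  induction s with
  | nil => simp [ins, wLe]
  | cons z zs ih =>
    rcases List.pairwise_cons.mp hs with ⟨hz, hzs⟩
    by_cases hb : itemLt z v = true
    · rw [ins, if_pos hb]
      refine List.pairwise_cons.mpr ⟨?_, ih hzs⟩
      intro y hy
      rcases mem_ins.mp hy with rfl | hy
      · exact itemLt_asymm hb
      · exact hz y hy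
    · have hb' : itemLt z v = false := by simpa using hb
      rw [ins, if_neg (by simp [hb])]
      refine List.pairwise_cons.mpr ⟨?_, hs⟩
      intro y hy
      rcases List.mem_cons.mp hy with rfl | hy
      · exact hb'
      · exact itemLt_neg_trans (hz y hy) hb'

-- the two merge loops stay in lock step on (queue, sorted mirror) pairs
theorem loop_eq (sepSz : Int) :
    ∀ (fuel : Nat) (s q : List (Int × List Int)), s.length ≤ fuel + 1 → q.Perm s →
      s.Pairwise wLe → drainA (loopA fuel q sepSz) = (loopB s sepSz).map (fun it => it.2) := by
  intro fuel
  induction fuel with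
  | zero =>
    intro s q hn hperm hsort
    have hq : q.length ≤ 1 := by rw [hperm.length_eq]; omega
    rw [loopA_low 0 q sepSz hq]
    match s, hn with
    | [], _ =>
      rw [loopB_nil]
      exact drainA_eq hperm hsort
    | [a], _ =>
      rw [loopB_single]
      exact drainA_eq hperm hsort
  | succ n ih =>
    intro s q hn hperm hsort
    match s with
    | [] =>
      rw [loopB_nil, loopA_low _ q sepSz (by rw [hperm.length_eq]; simp)]
      exact drainA_eq hperm hsort
    | [a] =>
      rw [loopB_single, loopA_low _ q sepSz (by rw [hperm.length_eq]; simp)]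
      exact drainA_eq hperm hsort
    | a :: b :: rest =>
      match q with
      | [] => exact absurd hperm.length_eq (by simp)
      | [x] => exact absurd hperm.length_eq (by simp)
      | x :: y :: t =>
        obtain ⟨hmin1, hperm1⟩ := extract_head hperm hsort
        obtain ⟨z, u, h1⟩ : ∃ z u, (x :: y :: t).erase (pqMin x (y :: t)) = z :: u := by
          match hzu : (x :: y :: t).erase (pqMin x (y :: t)) with
          | [] =>
            rw [hzu] at hperm1
            exact absurd hperm1.length_eq (by simp)
          | z :: u => exact ⟨z, u, rfl⟩
        rw [h1] at hperm1
        have hsort' : (b :: rest).Pairwise wLe := List.Pairwise.of_cons hsort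
        obtain ⟨hmin2, hperm2⟩ := extract_head hperm1 hsort'
        rw [hmin2] at hperm2
        rw [loopA_step n x y z t u sepSz h1, loopB_cons2, hmin1, hmin2]
        by_cases hgt : a.1 + b.1 > sepSz
        · simp only [if_pos hgt]
          refine drainA_eq ?_ hsort
          exact ((hperm2.append (List.Perm.refl [b, a])).trans
            List.perm_append_comm).trans (List.Perm.swap a b rest)
        · simp only [if_neg hgt]
          have hrest : rest.Pairwise wLe := List.Pairwise.of_cons hsort'
          refine ih (ins rest (a.1 + b.1, a.2 ++ b.2)) _ ?_ ?_ (ins_pairwise hrest)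
          · have hl : (ins rest (a.1 + b.1, a.2 ++ b.2)).length = rest.length + 1 :=
              (ins_perm _ _).length_eq.trans (by simp)
            have hs : (a :: b :: rest).length ≤ n + 2 := hn
            simp at hs
            omega
          · refine (hperm2.append (List.Perm.refl _)).trans ?_
            refine (List.perm_append_comm).trans ?_
            exact (ins_perm rest (a.1 + b.1, a.2 ++ b.2)).symm

theorem foldl_ins_inv (l acc : List (Int × List Int)) (hacc : acc.Pairwise wLe) :
    (l.foldl ins acc).Perm (acc ++ l) ∧ (l.foldl ins acc).Pairwise wLe := by
  induction l generalizing acc with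
  | nil => simpa using hacc
  | cons v l ih =>
    obtain ⟨hp, hs⟩ := ih (ins acc v) (ins_pairwise hacc)
    refine ⟨?_, hs⟩
    refine hp.trans ?_
    refine ((ins_perm acc v).append (List.Perm.refl l)).trans ?_
    simpa using (List.perm_middle (a := v) (l₁ := acc) (l₂ := l)).symm

theorem init_inv (l : List (Int × List Int)) :
    (l.foldl ins []).Perm l ∧ (l.foldl ins []).Pairwise wLe := by
  simpa using foldl_ins_inv l [] (by simp)

-- ===== VERDICT (by name: the statement is the Claim_ definition above) =====
theorem solve_spec : Claim_equal_solve := by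
  intro pri sepSz _
  unfold Spec_solve solve solve_alt
  obtain ⟨hp, hs⟩ := init_inv (pri.mapIdx fun i p => (p, [(i : Int) + 1]))
  exact loop_eq sepSz (pri.mapIdx fun i p => (p, [(i : Int) + 1])).length _ _
    (by rw [hp.length_eq]; omega) hp.symm hs
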